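-- pv_equiv track=rewrite | github.com/eloitanguy/parrot | dataset.py | prepare_sentence
-- ===== SOURCE A (Python) =====
-- C_TO_INDEX = {'epsilon': 0,
--               'a': 1, 'b': 2, 'c': 3, 'd': 4, 'e': 5, 'f': 6, 'g': 7, 'h': 8, 'i': 9, 'j': 10, 'k': 11, 'l': 12,
--               'm': 13, 'n': 14, 'o': 15, 'p': 16, 'q': 17, 'r': 18, 's': 19, 't': 20, 'u': 21, 'v': 22, 'w': 23,
--               'x': 24, 'y': 25, 'z': 26, ' ': 27, "'": 28
--               }
--
-- def prepare_sentence(sentence):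
--     prep_sent = sentence.lower().replace('\u2019', "'").replace('\u2018', "'").split(' ')
--     out = []
--     for word in prep_sent:
--         word_list = list(word)
--         for c in word_list:
--             if c in C_TO_INDEX:  # invalid characters are dismissed
--                 out.append(c)
--         out.append(' ')  # end of word
--     return out
-- ===== SOURCE B (Python) =====
-- def prepare_sentence(sentence):
--     # one flat pass: per-character normalization + range classification,
--     # no full-string lower/replace passes, no split, no dict
--     out = []
--     for c in sentence:
--         c = c.lower()
--         if c in '\u2019\u2018':
--             c = "'"
--         if c == ' ' or c == "'" or 'a' <= c <= 'z':
--             out.append(c)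
--     out.append(' ')
--     return out
-- ===== Notes on version B (the rewrite author's own statement) =====
-- stated objective: simpler
-- what changed: B replaces A's staged pipeline (whole-string lower, two replace passes, split on spaces, nested per-word loop with dict-membership test) by one flat per-character loop that lowercases, folds the curly quotes and classifies each character by a range/equality test, appending a single trailing space separator (valid because the space character is itself kept).
import Mathlib
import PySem

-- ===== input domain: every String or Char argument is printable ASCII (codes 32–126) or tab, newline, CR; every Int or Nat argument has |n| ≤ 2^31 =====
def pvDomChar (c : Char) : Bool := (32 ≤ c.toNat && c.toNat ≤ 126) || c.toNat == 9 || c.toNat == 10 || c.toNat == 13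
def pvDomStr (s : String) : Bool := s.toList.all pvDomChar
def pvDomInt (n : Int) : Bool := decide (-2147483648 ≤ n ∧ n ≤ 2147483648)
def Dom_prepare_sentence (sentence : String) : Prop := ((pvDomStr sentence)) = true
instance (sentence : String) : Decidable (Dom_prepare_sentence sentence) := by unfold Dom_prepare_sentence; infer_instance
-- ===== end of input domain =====

-- B replaces A's staged lower/replace/split(' ')/nested-word-loop pipeline by one flat
-- per-character loop (lowercase, fold curly quotes, range classification, one trailing space).

-- ===== PORT A =====
def C_TO_INDEX : PySem.Dict String Int :=
  PySem.Dict.ofList [("epsilon", 0),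
    ("a", 1), ("b", 2), ("c", 3), ("d", 4), ("e", 5), ("f", 6), ("g", 7), ("h", 8),
    ("i", 9), ("j", 10), ("k", 11), ("l", 12), ("m", 13), ("n", 14), ("o", 15),
    ("p", 16), ("q", 17), ("r", 18), ("s", 19), ("t", 20), ("u", 21), ("v", 22),
    ("w", 23), ("x", 24), ("y", 25), ("z", 26), (" ", 27), ("'", 28)]

def prepare_sentence (sentence : String) : List String :=
  -- sentence.lower().replace('\u2019', "'").replace('\u2018', "'").split(' ')
  let prep_sent : List (List Char) :=
    PySem.Chars.splitOn
      (PySem.Chars.replace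
        (PySem.Chars.replace (PySem.Chars.lower sentence.toList) ['\u2019'] ['\''])
        ['\u2018'] ['\''])
      [' ']
  prep_sent.foldl (fun out word =>
    (word.foldl (fun out c =>
        if C_TO_INDEX.contains (String.ofList [c]) then out ++ [String.ofList [c]] else out) out)
      ++ [" "]) []

-- ===== PORT B =====
def prepare_sentence_alt (sentence : String) : List String :=
  let out : List String :=
    sentence.toList.foldl (fun out c =>
      let d := PySem.Chars.lowerChar c
      let d := if d = '\u2019' ∨ d = '\u2018' then '\'' else d
      if d = ' ' ∨ d = '\'' ∨ ('a' ≤ d ∧ d ≤ 'z') then out ++ [String.ofList [d]] else out) []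
  out ++ [" "]

-- ===== PRECONDITION & SPEC =====
def Spec_prepare_sentence (sentence : String) (out : List String) : Prop := out = prepare_sentence_alt sentence
instance (sentence : String) (out : List String) : Decidable (Spec_prepare_sentence sentence out) := by unfold Spec_prepare_sentence; infer_instance

-- ===== CLAIM (what is proved, stated in full; the proofs are below) =====
def Claim_equal_prepare_sentence : Prop := ∀ (sentence : String), Dom_prepare_sentence sentence → Spec_prepare_sentence sentence (prepare_sentence sentence)

-- ===== LEMMAS AND PROOFS =====

-- B's per-character normalization (lowercase + curly-quote folding), named for the proofs
def pvNormChar (c : Char) : Char :=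
  let d := PySem.Chars.lowerChar c
  if d = '\u2019' ∨ d = '\u2018' then '\'' else d

theorem pvCharLe (a b : Char) : a ≤ b ↔ a.toNat ≤ b.toNat := by
  rw [Char.le_def]; exact ge_iff_le

theorem pvItemsC : C_TO_INDEX.items = [("epsilon", 0),
    ("a", 1), ("b", 2), ("c", 3), ("d", 4), ("e", 5), ("f", 6), ("g", 7), ("h", 8),
    ("i", 9), ("j", 10), ("k", 11), ("l", 12), ("m", 13), ("n", 14), ("o", 15),
    ("p", 16), ("q", 17), ("r", 18), ("s", 19), ("t", 20), ("u", 21), ("v", 22),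
    ("w", 23), ("x", 24), ("y", 25), ("z", 26), (" ", 27), ("'", 28)] := by decide

-- membership of a one-character string in C_TO_INDEX is exactly B's range/equality test
theorem pvCharKey (d : Char) :
    C_TO_INDEX.contains (String.ofList [d]) =
      decide (d = ' ' ∨ d = '\'' ∨ ('a' ≤ d ∧ d ≤ 'z')) := by
  have hkey : ∀ (s : String), (s == String.ofList [d]) = (s.toList == [d]) := by
    intro s
    apply Bool.eq_iff_iff.mpr
    rw [beq_iff_eq, beq_iff_eq]
    constructor
    · intro h; rw [h, String.toList_ofList]
    · intro h; rw [← String.ofList_toList (s := s), h]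
  have h1 : ∀ c : Char, ([c] = [d]) ↔ d.toNat = c.toNat := by
    intro c
    constructor
    · intro h
      simp only [List.cons.injEq, and_true] at h
      rw [h]
    · intro h
      have hd := Char.ofNat_toNat d
      have hc := Char.ofNat_toNat c
      rw [h] at hd
      rw [hd.symm.trans hc]
  have h2 : ∀ c : Char, (d = c) ↔ d.toNat = c.toNat := by
    intro c
    constructor
    · rintro rfl; rfl
    · intro h
      have hd := Char.ofNat_toNat d
      rw [h] at hd
      rw [← hd, Char.ofNat_toNat]
  rw [PySem.Dict.contains, pvItemsC]
  apply Bool.eq_iff_iff.mpr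
  simp only [List.any_cons, List.any_nil, hkey, beq_iff_eq, Bool.or_eq_true, decide_eq_true_eq,
    show ("epsilon":String).toList = ['e','p','s','i','l','o','n'] from rfl,
    show ("a":String).toList = ['a'] from rfl,
    show ("b":String).toList = ['b'] from rfl,
    show ("c":String).toList = ['c'] from rfl,
    show ("d":String).toList = ['d'] from rfl,
    show ("e":String).toList = ['e'] from rfl,
    show ("f":String).toList = ['f'] from rfl,
    show ("g":String).toList = ['g'] from rfl,
    show ("h":String).toList = ['h'] from rfl,
    show ("i":String).toList = ['i'] from rfl,
    show ("j":String).toList = ['j'] from rfl,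
    show ("k":String).toList = ['k'] from rfl,
    show ("l":String).toList = ['l'] from rfl,
    show ("m":String).toList = ['m'] from rfl,
    show ("n":String).toList = ['n'] from rfl,
    show ("o":String).toList = ['o'] from rfl,
    show ("p":String).toList = ['p'] from rfl,
    show ("q":String).toList = ['q'] from rfl,
    show ("r":String).toList = ['r'] from rfl,
    show ("s":String).toList = ['s'] from rfl,
    show ("t":String).toList = ['t'] from rfl,
    show ("u":String).toList = ['u'] from rfl,
    show ("v":String).toList = ['v'] from rfl,
    show ("w":String).toList = ['w'] from rfl,
    show ("x":String).toList = ['x'] from rfl,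
    show ("y":String).toList = ['y'] from rfl,
    show ("z":String).toList = ['z'] from rfl,
    show (" ":String).toList = [' '] from rfl,
    show ("'":String).toList = ['\''] from rfl,
    h1, h2, pvCharLe]
  simp only [List.cons.injEq, reduceCtorEq, and_false, false_or,
    show ('a').toNat = 97 from rfl,
    show ('b').toNat = 98 from rfl,
    show ('c').toNat = 99 from rfl,
    show ('d').toNat = 100 from rfl,
    show ('e').toNat = 101 from rfl,
    show ('f').toNat = 102 from rfl,
    show ('g').toNat = 103 from rfl,
    show ('h').toNat = 104 from rfl,
    show ('i').toNat = 105 from rfl,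
    show ('j').toNat = 106 from rfl,
    show ('k').toNat = 107 from rfl,
    show ('l').toNat = 108 from rfl,
    show ('m').toNat = 109 from rfl,
    show ('n').toNat = 110 from rfl,
    show ('o').toNat = 111 from rfl,
    show ('p').toNat = 112 from rfl,
    show ('q').toNat = 113 from rfl,
    show ('r').toNat = 114 from rfl,
    show ('s').toNat = 115 from rfl,
    show ('t').toNat = 116 from rfl,
    show ('u').toNat = 117 from rfl,
    show ('v').toNat = 118 from rfl,
    show ('w').toNat = 119 from rfl,
    show ('x').toNat = 120 from rfl,
    show ('y').toNat = 121 from rfl,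
    show ('z').toNat = 122 from rfl,
    show (' ').toNat = 32 from rfl,
    show ('\'').toNat = 39 from rfl]
  show _ ↔ (d.toNat = 32 ∨ d.toNat = 39 ∨ (97 ≤ d.toNat ∧ d.toNat ≤ 122))
  constructor
  · intro h
    repeat' rcases h with h | h
    all_goals omega
  · intro h
    rcases h with h | h | h <;> omega

-- Python's str.replace with a one-character pattern is a per-character map
theorem pvReplaceGo_single (o : Char) (new : List Char) :
    ∀ (fuel : Nat) (l acc : List Char), l.length ≤ fuel →
      PySem.Chars.replace.go [o] new fuel l acc =
        acc.reverse ++ l.flatMap (fun c => if c = o then new else [c]) := by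
  intro fuel
  induction fuel with
  | zero =>
    intro l acc h
    interval_cases hl : l.length
    rw [List.length_eq_zero_iff] at hl; subst hl
    simp [PySem.Chars.replace.go]
  | succ fuel ih =>
    intro l acc h
    cases l with
    | nil => simp [PySem.Chars.replace.go]
    | cons c rest =>
      rw [PySem.Chars.replace.go]
      by_cases hc : c = o
      · subst hc
        have hpre : List.isPrefixOf [c] (c :: rest) = true := by simp [List.isPrefixOf]
        rw [if_pos hpre]
        have hd : List.drop [c].length (c :: rest) = rest := by simp
        rw [hd, ih rest (new.reverse ++ acc) (by simpa using Nat.le_of_succ_le_succ h)]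
        simp
      · have hpre : List.isPrefixOf [o] (c :: rest) = false := by
          simp [List.isPrefixOf, Ne.symm hc]
        rw [if_neg (by simp [hpre])]
        rw [ih rest (c :: acc) (by simpa using Nat.le_of_succ_le_succ h)]
        simp [hc]

theorem pvReplace_single (l : List Char) (o n : Char) :
    PySem.Chars.replace l [o] [n] = l.map (fun c => if c = o then n else c) := by
  unfold PySem.Chars.replace
  rw [if_neg (by simp), pvReplaceGo_single o [n] l.length l [] le_rfl]
  simp only [List.reverse_nil, List.nil_append]
  induction l with
  | nil => simp
  | cons c rest ih =>
    by_cases hc : c = o <;> simp [hc, List.flatMap_cons, ih]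

-- the split(' ') pipeline of A: structural single-separator split
def pvSplit1 (d : Char) : List Char → List Char × List (List Char)
  | [] => ([], [])
  | c :: rest =>
      let (w, ws) := pvSplit1 d rest
      if c = d then ([], w :: ws) else (c :: w, ws)

theorem pvSplitOn_go_eq (d : Char) :
    ∀ (fuel : Nat) (l cur : List Char) (acc : List (List Char)), l.length < fuel →
      PySem.Chars.splitOn.go [d] fuel l cur acc =
        acc.reverse ++ (cur.reverse ++ (pvSplit1 d l).1) :: (pvSplit1 d l).2 := by
  intro fuel
  induction fuel with
  | zero => intro l cur acc h; omega
  | succ fuel ih =>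
    intro l cur acc h
    cases l with
    | nil => simp [PySem.Chars.splitOn.go, pvSplit1]
    | cons c rest =>
      rw [PySem.Chars.splitOn.go]
      by_cases hc : c = d
      · subst hc
        have hpre : List.isPrefixOf [c] (c :: rest) = true := by
          simp [List.isPrefixOf]
        rw [if_pos hpre]
        have : List.drop [c].length (c :: rest) = rest := by simp
        rw [this, ih rest [] (cur.reverse :: acc) (by simpa using Nat.lt_of_succ_lt_succ h)]
        simp [pvSplit1]
      · have hpre : List.isPrefixOf [d] (c :: rest) = false := by
          simp [List.isPrefixOf, Ne.symm hc]
        rw [if_neg (by simp [hpre])]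
        rw [ih rest (c :: cur) acc (by simpa using Nat.lt_of_succ_lt_succ h)]
        simp [pvSplit1, hc]

theorem pvSplitOn_single (d : Char) (cs : List Char) :
    PySem.Chars.splitOn cs [d] = (pvSplit1 d cs).1 :: (pvSplit1 d cs).2 := by
  unfold PySem.Chars.splitOn
  rw [pvSplitOn_go_eq d (cs.length + 1) cs [] [] (by omega)]
  simp

-- A's word-wise pass over pvSplit1's pieces is the flat filtered pass plus one separator,
-- because ' ' itself satisfies the filter
theorem pvFlat (p : Char → Bool) (mk : Char → String) (sep : String)
    (hp : p ' ' = true) (hsep : mk ' ' = sep) :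
    ∀ cs : List Char,
      (((pvSplit1 ' ' cs).1.filter p).map mk ++ [sep]) ++
        ((pvSplit1 ' ' cs).2.flatMap (fun w => (w.filter p).map mk ++ [sep])) =
      (cs.filter p).map mk ++ [sep] := by
  intro cs
  induction cs with
  | nil => simp [pvSplit1]
  | cons c rest ih =>
    by_cases hc : c = ' '
    · rw [show pvSplit1 ' ' (c :: rest) = ([], (pvSplit1 ' ' rest).1 :: (pvSplit1 ' ' rest).2) from by
        simp [pvSplit1, hc]]
      rw [show List.filter p (c :: rest) = ' ' :: List.filter p rest from by
        simp [hc, hp]]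
      simp only [List.flatMap_cons, List.filter_nil, List.map_nil, List.nil_append, List.map_cons,
        hsep, List.cons_append, List.append_assoc] at *
      rw [ih]
    · rw [show pvSplit1 ' ' (c :: rest) = (c :: (pvSplit1 ' ' rest).1, (pvSplit1 ' ' rest).2) from by
        simp [pvSplit1, hc]]
      by_cases hpc : p c
      · rw [List.filter_cons_of_pos hpc, List.filter_cons_of_pos hpc, List.map_cons, List.map_cons]
        simp only [List.cons_append, List.append_assoc] at *
        rw [ih]
      · rw [List.filter_cons_of_neg (by simp [hpc]), List.filter_cons_of_neg (by simp [hpc])]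
        simp only [List.append_assoc] at *
        rw [ih]

-- B's flat loop, characterized as filter-then-map over the normalized characters
theorem pvAltFoldl (l : List Char) (acc : List String) :
    l.foldl (fun out c =>
      let d := PySem.Chars.lowerChar c
      let d := if d = '\u2019' ∨ d = '\u2018' then '\'' else d
      if d = ' ' ∨ d = '\'' ∨ ('a' ≤ d ∧ d ≤ 'z') then out ++ [String.ofList [d]] else out) acc
    = acc ++ (l.filter (fun c => C_TO_INDEX.contains (String.ofList [pvNormChar c]))).map
        (fun c => String.ofList [pvNormChar c]) := by
  induction l generalizing acc with
  | nil => simp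
  | cons c rest ih =>
    rw [List.foldl_cons]
    show List.foldl _ (if pvNormChar c = ' ' ∨ pvNormChar c = '\'' ∨
        ('a' ≤ pvNormChar c ∧ pvNormChar c ≤ 'z')
      then acc ++ [String.ofList [pvNormChar c]] else acc) _ = _
    by_cases h : pvNormChar c = ' ' ∨ pvNormChar c = '\'' ∨ ('a' ≤ pvNormChar c ∧ pvNormChar c ≤ 'z')
    · rw [if_pos h, ih]
      rw [List.filter_cons_of_pos (by rw [pvCharKey]; exact decide_eq_true h)]
      simp
    · rw [if_neg h, ih]
      rw [List.filter_cons_of_neg (by rw [pvCharKey]; simpa using h)]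

-- the two replace passes compose into B's single quote-folding step
theorem pvNorm_eq (c : Char) :
    (if (if PySem.Chars.lowerChar c = '\u2019' then '\'' else PySem.Chars.lowerChar c) = '\u2018'
      then '\'' else (if PySem.Chars.lowerChar c = '\u2019' then '\'' else PySem.Chars.lowerChar c))
    = pvNormChar c := by
  unfold pvNormChar
  by_cases h19 : PySem.Chars.lowerChar c = '\u2019' <;>
    by_cases h18 : PySem.Chars.lowerChar c = '\u2018' <;>
      simp [h19, h18]

-- ===== VERDICT (by name: the statement is the Claim_ definition above) =====
theorem prepare_sentence_spec : Claim_equal_prepare_sentence := by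
  intro sentence _
  unfold Spec_prepare_sentence prepare_sentence prepare_sentence_alt
  dsimp only
  rw [pvReplace_single, pvReplace_single]
  rw [show PySem.Chars.lower sentence.toList = sentence.toList.map PySem.Chars.lowerChar from rfl]
  rw [List.map_map, List.map_map]
  set l := sentence.toList with hl
  set g : Char → Char :=
    ((fun c => if c = '\u2018' then '\'' else c) ∘ fun c => if c = '\u2019' then '\'' else c) ∘
      PySem.Chars.lowerChar with hg
  rw [pvSplitOn_single ' ' (l.map g)]
  have hinner : ∀ (w : List Char) (out : List String),
      w.foldl (fun out c =>
        if C_TO_INDEX.contains (String.ofList [c]) then out ++ [String.ofList [c]] else out) out =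
      out ++ (w.filter (fun c => C_TO_INDEX.contains (String.ofList [c]))).map
        (fun c => String.ofList [c]) := by
    intro w out
    exact PySem.List.foldl_append_if _ _ w out
  simp only [hinner]
  have hfold := PySem.List.foldl_append_eq_flatMap
      (fun w => (w.filter (fun c => C_TO_INDEX.contains (String.ofList [c]))).map
        (fun c => String.ofList [c]) ++ [" "])
      ((pvSplit1 ' ' (l.map g)).1 :: (pvSplit1 ' ' (l.map g)).2) []
  simp only [List.append_assoc] at hfold ⊢
  rw [hfold]
  simp only [List.flatMap_cons]
  have hA := pvFlat (fun c => C_TO_INDEX.contains (String.ofList [c]))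
      (fun c => String.ofList [c]) " " (by decide) (by decide) (l.map g)
  simp only [List.append_assoc] at hA
  simp only [List.nil_append, List.append_assoc]
  rw [hA]
  -- both sides as a filter/map over l of the normalized character
  rw [List.filter_map, List.map_map, pvAltFoldl, List.nil_append]
  have hgn : ∀ c : Char, g c = pvNormChar c := by
    intro c
    rw [hg]
    simpa using pvNorm_eq c
  have hfil : l.filter ((fun c => C_TO_INDEX.contains (String.ofList [c])) ∘ g) =
      l.filter (fun c => C_TO_INDEX.contains (String.ofList [pvNormChar c])) := by
    apply List.filter_congr
    intro c _
    simp [Function.comp, hgn c]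
  rw [hfil]
  congr 1
  apply List.map_congr_left
  intro c _
  simp [Function.comp, hgn c]
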